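-- pv_equiv track=rewrite | github.com/RyanFleck/Projects | py/codesignal/similarDNA.py | similarACTGCount
-- ===== SOURCE A (Python) =====
-- def similarACTGCount(refcount, candidate):
--     # First test, counts ATCG and ensures there are fewer than three deviations
--     cancount = countACTG(candidate)
--     totaldiff = 0
--     for indice in range(4):
--         diff = refcount[indice] - cancount[indice]
--         totaldiff = totaldiff + abs(diff)
--
--     # Totaldiff of 6 indicates 3 deviant characters.
--     if totaldiff < 7:
--         return True
--
--     return False
--
-- def countACTG(seq):
--     A = seq.count('A')
--     C = seq.count('C')
--     T = seq.count('T')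
--     G = seq.count('G')
--     return [A, C, T, G]
-- ===== SOURCE B (Python) =====
-- def similarACTGCount(refcount, candidate):
--     # Divide-and-conquer: recursively split the candidate in half and merge
--     # the four-letter tallies of the halves, instead of linear .count scans.
--     def tally(s):
--         n = len(s)
--         if n == 0:
--             return (0, 0, 0, 0)
--         if n == 1:
--             ch = s
--             return (int(ch == 'A'), int(ch == 'C'), int(ch == 'T'), int(ch == 'G'))
--         m = n // 2
--         a1, c1, t1, g1 = tally(s[:m])
--         a2, c2, t2, g2 = tally(s[m:])
--         return (a1 + a2, c1 + c2, t1 + t2, g1 + g2)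
--
--     a, c, t, g = tally(candidate)
--     return (abs(refcount[0] - a) + abs(refcount[1] - c)
--             + abs(refcount[2] - t) + abs(refcount[3] - g)) < 7
-- ===== Notes on version B (the rewrite author's own statement) =====
-- stated objective: alternative
-- what changed: B computes the four-letter tally by recursive divide-and-conquer (split the string in half, merge the halves' 4-tuples) and compares the absolute-difference sum directly, instead of A's four separate .count() scans plus an indexed loop over a built list.
import Mathlib
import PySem

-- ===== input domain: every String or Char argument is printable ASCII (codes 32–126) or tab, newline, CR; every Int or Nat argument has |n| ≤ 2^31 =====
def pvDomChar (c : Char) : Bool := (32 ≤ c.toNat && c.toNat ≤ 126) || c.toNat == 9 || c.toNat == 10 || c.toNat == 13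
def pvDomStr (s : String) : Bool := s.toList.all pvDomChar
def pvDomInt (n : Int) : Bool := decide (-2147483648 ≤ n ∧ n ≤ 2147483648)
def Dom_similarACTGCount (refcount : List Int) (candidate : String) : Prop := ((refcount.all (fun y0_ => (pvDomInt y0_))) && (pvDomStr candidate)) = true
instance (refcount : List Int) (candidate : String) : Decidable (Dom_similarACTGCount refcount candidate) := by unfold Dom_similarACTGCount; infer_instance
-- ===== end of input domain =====

-- B computes the four-letter tally by recursive divide-and-conquer over string halves instead of A's four .count() scans plus an indexed loop; an alternative of the same cost.

-- ===== PORT A =====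
def countACTG (seq : String) : List Int :=
  let A : Int := PySem.Str.count seq "A"
  let C : Int := PySem.Str.count seq "C"
  let T : Int := PySem.Str.count seq "T"
  let G : Int := PySem.Str.count seq "G"
  [A, C, T, G]

def similarACTGCount (refcount : List Int) (candidate : String) : Bool :=
  let cancount := countACTG candidate
  let totaldiff : Int :=
    (PySem.List.pyRange 0 4 1).foldl
      (fun totaldiff indice =>
        let diff := PySem.List.pyGetD refcount indice 0 - PySem.List.pyGetD cancount indice 0
        totaldiff + |diff|) 0
  if totaldiff < 7 then true else false

-- ===== PORT B =====
-- divide-and-conquer tally of 'A','C','T','G' (mirrors Source B's recursive tally)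
def tallyB : List Char → Int × Int × Int × Int
  | [] => (0, 0, 0, 0)
  | [ch] => (if ch = 'A' then 1 else 0, if ch = 'C' then 1 else 0,
             if ch = 'T' then 1 else 0, if ch = 'G' then 1 else 0)
  | a :: b :: rest =>
    let s := a :: b :: rest
    let m := s.length / 2
    let l := tallyB (s.take m)
    let r := tallyB (s.drop m)
    (l.1 + r.1, l.2.1 + r.2.1, l.2.2.1 + r.2.2.1, l.2.2.2 + r.2.2.2)
termination_by l => l.length
decreasing_by
  · simp [List.length_take]; omega
  · simp [List.length_drop]; omega

def similarACTGCount_alt (refcount : List Int) (candidate : String) : Bool :=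
  let t := tallyB candidate.toList
  decide (|PySem.List.pyGetD refcount 0 0 - t.1| + |PySem.List.pyGetD refcount 1 0 - t.2.1|
    + |PySem.List.pyGetD refcount 2 0 - t.2.2.1| + |PySem.List.pyGetD refcount 3 0 - t.2.2.2| < 7)

-- ===== PRECONDITION & SPEC =====
-- Pre_ excludes refcount with fewer than 4 entries, on which both A and B raise IndexError.
def Pre_similarACTGCount (refcount : List Int) (candidate : String) : Prop := 4 ≤ refcount.length
instance (refcount : List Int) (candidate : String) : Decidable (Pre_similarACTGCount refcount candidate) := by unfold Pre_similarACTGCount; infer_instance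
def pvWitness_similarACTGCount : List Int × String := ([3, 2, 1, 0], "ACTGA")

def Spec_similarACTGCount (refcount : List Int) (candidate : String) (out : Bool) : Prop := out = similarACTGCount_alt refcount candidate
instance (refcount : List Int) (candidate : String) (out : Bool) : Decidable (Spec_similarACTGCount refcount candidate out) := by unfold Spec_similarACTGCount; infer_instance

-- ===== CLAIM (what is proved, stated in full; the proofs are below) =====
def Claim_equal_similarACTGCount : Prop := ∀ (refcount : List Int) (candidate : String), Dom_similarACTGCount refcount candidate → Pre_similarACTGCount refcount candidate → Spec_similarACTGCount refcount candidate (similarACTGCount refcount candidate)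

-- ===== LEMMAS AND PROOFS =====

lemma count_go_singleton (c : Char) : ∀ (l : List Char) (fuel acc : Nat), l.length ≤ fuel →
    PySem.Chars.count.go [c] fuel l acc = acc + l.count c := by
  intro l
  induction l with
  | nil => intro fuel acc _; cases fuel <;> simp [PySem.Chars.count.go]
  | cons h t ih =>
    intro fuel acc hf
    cases fuel with
    | zero => simp at hf
    | succ n =>
      simp only [PySem.Chars.count.go, List.isPrefixOf, List.count_cons]
      by_cases hc : c = h
      · subst hc
        simp only [beq_self_eq_true, Bool.true_and, if_true, List.length_cons,
          List.length_nil, List.drop_succ_cons, List.drop_zero]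
        rw [ih n (acc + 1) (by simpa using hf)]
        omega
      · have hb : (c == h) = false := by simp [hc]
        simp only [hb, Bool.false_and]
        rw [ih n acc (by simpa using hf)]
        have : (h == c) = false := by simp [Ne.symm hc]
        simp [this]

lemma count_singleton (s : List Char) (c : Char) : PySem.Chars.count s [c] = s.count c := by
  rw [PySem.Chars.count, if_neg (by simp)]
  rw [count_go_singleton c s s.length 0 le_rfl]
  omega

lemma str_count_char (s : String) (c : Char) (cs : String) (h : cs.toList = [c]) :
    PySem.Str.count s cs = s.toList.count c := by
  rw [PySem.Str.count_eq, h, count_singleton]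

lemma tallyB_eq (l : List Char) :
    tallyB l = (↑(l.count 'A'), ↑(l.count 'C'), ↑(l.count 'T'), ↑(l.count 'G')) := by
  induction l using tallyB.induct with
  | case1 => simp [tallyB]
  | case2 ch =>
    simp only [tallyB, List.count_cons, List.count_nil]
    refine Prod.ext ?_ (Prod.ext ?_ (Prod.ext ?_ ?_)) <;>
      · by_cases h : ch = 'A' <;> by_cases h2 : ch = 'C' <;> by_cases h3 : ch = 'T' <;>
          by_cases h4 : ch = 'G' <;> simp_all
  | case3 a b rest s m ih1 ih2 =>
    have hc : ∀ c : Char, (List.count c (a :: b :: rest) : Int)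
        = ↑(List.count c (List.take ((rest.length + 1 + 1) / 2) (a :: b :: rest)))
        + ↑(List.count c (List.drop ((rest.length + 1 + 1) / 2) (a :: b :: rest))) := by
      intro c; rw [← Nat.cast_add, ← List.count_append, List.take_append_drop]
    simp only [m, s] at ih1 ih2
    simp only [List.length_cons] at ih1 ih2
    simp [tallyB, ih1, ih2, hc]

-- ===== VERDICT (by name: the statement is the Claim_ definition above) =====
theorem similarACTGCount_spec : Claim_equal_similarACTGCount := by
  intro refcount candidate _ _
  unfold Spec_similarACTGCount similarACTGCount similarACTGCount_alt countACTG
  rw [tallyB_eq]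
  have hr : PySem.List.pyRange 0 4 1 = [0, 1, 2, 3] := by decide
  rw [hr]
  simp only [List.foldl_cons, List.foldl_nil]
  rw [str_count_char candidate 'A' "A" rfl, str_count_char candidate 'C' "C" rfl,
    str_count_char candidate 'T' "T" rfl, str_count_char candidate 'G' "G" rfl]
  simp [PySem.List.pyGetD]
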